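-- pv_equiv track=rewrite | github.com/bufbuild/protovalidate-python | protovalidate/internal/extra_func.py | _is_port
-- ===== SOURCE A (Python) =====
-- def _is_port(val: str) -> bool:
--     if len(val) == 0:
--         return False
--
--     for c in val:
--         if c < "0" or c > "9":
--             return False
--
--     try:
--         return int(val) <= 65535
--
--     except ValueError:
--         # Error converting to number
--         return False
-- ===== SOURCE B (Python) =====
-- def _is_port(val: str) -> bool:
--     # Different strategy: no int() and no numeric accumulation at all.
--     # Digit check via str.strip with the digit set, magnitude check by length
--     # + lexicographic string comparison after stripping leading zeros.
--     if not val or val.strip("0123456789"):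
--         return False
--     s = val.lstrip("0")
--     return len(s) < 5 or (len(s) == 5 and s <= "65535")
-- ===== Notes on version B (the rewrite author's own statement) =====
-- stated objective: alternative
-- what changed: Replaces the per-character digit loop and the int() conversion with a strip-based digit test plus a purely symbolic magnitude test: strip leading zeros, then decide by the string's length and, at length five, by lexicographic comparison with the maximum port spelled as a string - no numeric value is ever computed.
import Mathlib
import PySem

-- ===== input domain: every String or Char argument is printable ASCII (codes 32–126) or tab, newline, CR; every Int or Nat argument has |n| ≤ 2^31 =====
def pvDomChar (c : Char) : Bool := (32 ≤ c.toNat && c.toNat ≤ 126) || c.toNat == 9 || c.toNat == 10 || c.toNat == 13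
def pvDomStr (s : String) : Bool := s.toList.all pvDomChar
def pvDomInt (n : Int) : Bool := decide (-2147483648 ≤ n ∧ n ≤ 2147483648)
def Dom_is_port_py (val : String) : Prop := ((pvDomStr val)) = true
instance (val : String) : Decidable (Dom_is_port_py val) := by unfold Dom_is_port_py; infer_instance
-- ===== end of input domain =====

-- B replaces the digit loop + int() conversion by a strip-based digit test and a
-- symbolic magnitude test (length + lexicographic comparison); objective: alternative.

-- ===== PORT A =====
-- the loop "for c in val: if c < '0' or c > '9': return False"
def aScan : List Char → Bool
  | [] => true
  | c :: cs => if c < '0' || c > '9' then false else aScan cs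

-- int(val), ported by hand step for step after CPython's rules (strip int-whitespace,
-- optional sign, decimal digits with single '_' separators, ValueError = none); it is
-- exact — same behaviour as PySem.Int.ofStr?, whose digit helper is private and hence
-- unusable in the proofs below, which need these named equations.
def aIntGo : List Char → Bool → Nat → Option Nat
  | [], afterDigit, acc => if afterDigit then some acc else none
  | c :: rest, afterDigit, acc =>
    if c.isDigit then aIntGo rest true (acc * 10 + (c.toNat - '0'.toNat))
    else if c = '_' ∧ afterDigit then
      match rest with
      | d :: _ => if d.isDigit then aIntGo rest false acc else none
      | [] => none
    else none

def aIntDigitsVal? : List Char → Option Nat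
  | [] => none
  | cs => aIntGo cs false 0

def aIntOfChars? (s : List Char) : Option Int :=
  match (((s.dropWhile PySem.Int.isIntSpace).reverse).dropWhile PySem.Int.isIntSpace).reverse with
  | '-' :: ds => (aIntDigitsVal? ds).map (fun n => -(n : Int))
  | '+' :: ds => (aIntDigitsVal? ds).map (fun n => (n : Int))
  | ds => (aIntDigitsVal? ds).map (fun n => (n : Int))

def is_port_py (val : String) : Bool :=
  if PySem.Str.len val == 0 then false
  else if aScan val.toList then
    match aIntOfChars? val.toList with
    | some n => decide (n ≤ 65535)   -- return int(val) <= 65535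
    | none => false                  -- except ValueError: return False
  else false

-- ===== PORT B =====
-- the constant "0123456789", written out as its characters
def bDigits : List Char := ['0','1','2','3','4','5','6','7','8','9']

-- the literal "65535", written out as its characters
def b65535 : List Char := ['6','5','5','3','5']

def is_port_py_alt (val : String) : Bool :=
  -- "if not val or val.strip("0123456789"): return False"
  if val.toList.isEmpty || !(PySem.Chars.stripChars val.toList bDigits).isEmpty then false
  else
    -- val.lstrip("0"): str.lstrip with a char-set argument, ported by hand as
    -- "drop leading characters that are members of the set" (exact CPython rule)
    let s := val.toList.dropWhile (fun c => (['0'] : List Char).contains c)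
    -- "len(s) < 5 or (len(s) == 5 and s <= "65535")"; Python's str <= is the
    -- code-point lexicographic order = Lean's ≤ on List Char (see PYSEM.md)
    decide (s.length < 5) || (decide (s.length = 5) && decide (s ≤ b65535))

-- ===== PRECONDITION & SPEC =====
def Spec_is_port_py (val : String) (out : Bool) : Prop := out = is_port_py_alt val
instance (val : String) (out : Bool) : Decidable (Spec_is_port_py val out) := by unfold Spec_is_port_py; infer_instance

-- ===== CLAIM (what is proved, stated in full; the proofs are below) =====
def Claim_equal_is_port_py : Prop := ∀ (val : String), Dom_is_port_py val → Spec_is_port_py val (is_port_py val)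

-- ===== LEMMAS AND PROOFS =====
-- the running value of A's int() loop on an all-digit list (lsd accumulator form)
def pvFold : List Char → Nat → Nat
  | [], acc => acc
  | c :: cs, acc => pvFold cs (acc * 10 + (c.toNat - '0'.toNat))

-- the numeric value, most-significant-digit-first form
def valM : List Char → Nat
  | [] => 0
  | c :: cs => (c.toNat - 48) * 10 ^ cs.length + valM cs

theorem char_range {c : Char} (h : (c < '0' || c > '9') = false) : 48 ≤ c.toNat ∧ c.toNat ≤ 57 := by
  simp only [Bool.or_eq_false_iff, decide_eq_false_iff_not, Char.lt_def, gt_iff_lt, UInt32.not_lt] at h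
  obtain ⟨h1, h2⟩ := h
  have a1 := UInt32.le_iff_toNat_le.mp h1
  have a2 := UInt32.le_iff_toNat_le.mp h2
  have e1 : ('0').val.toNat = 48 := by decide
  have e2 : ('9').val.toNat = 57 := by decide
  simp only [Char.toNat]
  omega

theorem digit_isDigit {c : Char} (h48 : 48 ≤ c.toNat) (h57 : c.toNat ≤ 57) : c.isDigit = true := by
  simp only [Char.isDigit, ge_iff_le, Bool.and_eq_true, decide_eq_true_eq]
  have e1 : ('0').val.toNat = 48 := by decide
  have e2 : ('9').val.toNat = 57 := by decide
  simp only [Char.toNat] at h48 h57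
  constructor <;> rw [UInt32.le_iff_toNat_le] <;> omega

theorem char_of_toNat {c : Char} {n : Nat} (h : c.toNat = n) (d : Char) (hd : d.toNat = n) : c = d := by
  exact Char.ext (UInt32.toNat_inj.mp (h.trans hd.symm))

theorem lem_scan_cons {c : Char} {cs : List Char} (h : aScan (c :: cs) = true) :
    (c < '0' || c > '9') = false ∧ aScan cs = true := by
  rw [aScan] at h
  cases hc : (c < '0' || c > '9') with
  | true => rw [hc] at h; simp at h
  | false => rw [hc] at h; simp at h; exact ⟨rfl, h⟩

theorem lem_scan_mem {cs : List Char} (h : aScan cs = true) {c : Char} (hm : c ∈ cs) :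
    48 ≤ c.toNat ∧ c.toNat ≤ 57 := by
  induction cs with
  | nil => cases hm
  | cons d ds ih =>
    obtain ⟨hd, hrest⟩ := lem_scan_cons h
    cases hm with
    | head => exact char_range hd
    | tail _ hm => exact ih hrest hm

theorem lem_scan_of_mem {cs : List Char} (h : ∀ c ∈ cs, 48 ≤ c.toNat ∧ c.toNat ≤ 57) :
    aScan cs = true := by
  induction cs with
  | nil => rfl
  | cons c cs ih =>
    have hc := h c List.mem_cons_self
    have hlt : (c < '0' || c > '9') = false := by
      simp only [Bool.or_eq_false_iff, decide_eq_false_iff_not, Char.lt_def, gt_iff_lt, UInt32.not_lt]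
      have e1 : ('0').val.toNat = 48 := by decide
      have e2 : ('9').val.toNat = 57 := by decide
      simp only [Char.toNat] at hc
      constructor <;> rw [UInt32.le_iff_toNat_le] <;> omega
    rw [aScan, hlt]
    simp only [Bool.false_eq_true, if_false]
    exact ih (fun d hd => h d (List.mem_cons_of_mem _ hd))

theorem lem_go : ∀ (cs : List Char) (c : Char), aScan (c :: cs) = true →
    ∀ (b : Bool) (acc : Nat), aIntGo (c :: cs) b acc = some (pvFold (c :: cs) acc) := by
  intro cs
  induction cs with
  | nil =>
    intro c h b acc
    obtain ⟨hd, _⟩ := lem_scan_cons h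
    have hc := char_range hd
    simp [aIntGo, pvFold, digit_isDigit hc.1 hc.2]
  | cons d rest ih =>
    intro c h b acc
    obtain ⟨hd, hrest⟩ := lem_scan_cons h
    have hc := char_range hd
    have hstep : aIntGo (c :: d :: rest) b acc
        = aIntGo (d :: rest) true (acc * 10 + (c.toNat - '0'.toNat)) := by
      simp [aIntGo, digit_isDigit hc.1 hc.2]
    rw [hstep, pvFold]
    exact ih d hrest true _

theorem lem_notSpace {c : Char} (h48 : 48 ≤ c.toNat) (h57 : c.toNat ≤ 57) :
    PySem.Int.isIntSpace c = false := by
  simp only [PySem.Int.isIntSpace, Bool.or_eq_false_iff, decide_eq_false_iff_not]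
  refine ⟨⟨⟨⟨⟨?_, ?_⟩, ?_⟩, ?_⟩, ?_⟩, ?_⟩ <;>
    (rintro rfl; revert h48 h57; decide)

theorem lem_clone {cs : List Char} (hne : cs ≠ []) (h : aScan cs = true) :
    aIntOfChars? cs = some ((pvFold cs 0 : Nat) : Int) := by
  have hdrop1 : cs.dropWhile PySem.Int.isIntSpace = cs := by
    cases cs with
    | nil => rfl
    | cons c cs =>
      have hc := lem_scan_mem h List.mem_cons_self
      rw [List.dropWhile_cons_of_neg]
      simp [lem_notSpace hc.1 hc.2]
  have hdrop2 : cs.reverse.dropWhile PySem.Int.isIntSpace = cs.reverse := by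
    cases hr : cs.reverse with
    | nil => rfl
    | cons c r =>
      have hmem : c ∈ cs := by
        have hh : c ∈ cs.reverse := by rw [hr]; exact List.mem_cons_self
        simpa using hh
      have hc := lem_scan_mem h hmem
      rw [List.dropWhile_cons_of_neg]
      simp [lem_notSpace hc.1 hc.2]
  rw [aIntOfChars?]
  rw [hdrop1, hdrop2, List.reverse_reverse]
  obtain ⟨c, cs', rfl⟩ : ∃ c cs', cs = c :: cs' := by
    cases cs with
    | nil => exact absurd rfl hne
    | cons c cs' => exact ⟨c, cs', rfl⟩
  have hc := lem_scan_mem h List.mem_cons_self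
  split
  · rename_i heq
    exfalso
    have hcm : c = '-' := (List.cons.injEq .. ▸ heq).1
    subst hcm; revert hc; decide
  · rename_i heq
    exfalso
    have hcp : c = '+' := (List.cons.injEq .. ▸ heq).1
    subst hcp; revert hc; decide
  · rw [show aIntDigitsVal? (c :: cs') = aIntGo (c :: cs') false 0 from rfl]
    rw [lem_go cs' c h false 0]
    rfl

theorem pvFold_eq_valM (cs : List Char) (acc : Nat) :
    pvFold cs acc = acc * 10 ^ cs.length + valM cs := by
  induction cs generalizing acc with
  | nil => simp [pvFold, valM]
  | cons c cs ih =>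
    rw [pvFold, ih, valM]
    have e0 : '0'.toNat = 48 := by decide
    rw [e0]
    simp only [List.length_cons, pow_succ]
    ring

theorem contains_digits_iff (c : Char) :
    bDigits.contains c = true ↔ 48 ≤ c.toNat ∧ c.toNat ≤ 57 := by
  constructor
  · intro h
    have hm : c ∈ bDigits := by rw [← List.contains_iff_mem]; exact h
    have : c = '0' ∨ c = '1' ∨ c = '2' ∨ c = '3' ∨ c = '4' ∨ c = '5' ∨ c = '6' ∨ c = '7' ∨ c = '8' ∨ c = '9' := by
      simpa [bDigits, List.mem_cons] using hm
    rcases this with rfl|rfl|rfl|rfl|rfl|rfl|rfl|rfl|rfl|rfl <;> decide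
  · rintro ⟨h1, h2⟩
    have hm : c ∈ bDigits := by
      have hv : c.toNat = 48 ∨ c.toNat = 49 ∨ c.toNat = 50 ∨ c.toNat = 51 ∨ c.toNat = 52 ∨ c.toNat = 53 ∨ c.toNat = 54 ∨ c.toNat = 55 ∨ c.toNat = 56 ∨ c.toNat = 57 := by omega
      rcases hv with h|h|h|h|h|h|h|h|h|h
      · rw [char_of_toNat h '0' (by decide)]; simp [bDigits]
      · rw [char_of_toNat h '1' (by decide)]; simp [bDigits]
      · rw [char_of_toNat h '2' (by decide)]; simp [bDigits]
      · rw [char_of_toNat h '3' (by decide)]; simp [bDigits]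
      · rw [char_of_toNat h '4' (by decide)]; simp [bDigits]
      · rw [char_of_toNat h '5' (by decide)]; simp [bDigits]
      · rw [char_of_toNat h '6' (by decide)]; simp [bDigits]
      · rw [char_of_toNat h '7' (by decide)]; simp [bDigits]
      · rw [char_of_toNat h '8' (by decide)]; simp [bDigits]
      · rw [char_of_toNat h '9' (by decide)]; simp [bDigits]
    rw [List.contains_iff_mem]; exact hm

theorem strip_empty_iff (cs : List Char) :
    (PySem.Chars.stripChars cs bDigits = []) ↔ aScan cs = true := by
  unfold PySem.Chars.stripChars
  simp only [List.reverse_eq_nil_iff, List.dropWhile_eq_nil_iff, List.mem_reverse]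
  constructor
  · intro h
    apply lem_scan_of_mem
    intro c hc
    have hsplit := List.takeWhile_append_dropWhile
      (p := fun c => bDigits.contains c) (l := cs)
    rw [← hsplit] at hc
    rcases List.mem_append.mp hc with h1 | h2
    · exact (contains_digits_iff c).mp (List.mem_takeWhile_imp h1)
    · exact (contains_digits_iff c).mp (h c h2)
  · intro h c hc
    have hmem : c ∈ cs :=
      (List.dropWhile_sublist (p := fun c => bDigits.contains c) (l := cs)).mem hc
    exact (contains_digits_iff c).mpr (lem_scan_mem h hmem)

theorem valM_dropZeros (cs : List Char) :
    valM (cs.dropWhile (fun c => (['0'] : List Char).contains c)) = valM cs := by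
  induction cs with
  | nil => rfl
  | cons c cs ih =>
    by_cases hc : ((['0'] : List Char).contains c) = true
    · have h0 : c = '0' := by
        have := List.contains_iff_mem.mp hc
        simpa using this
      rw [List.dropWhile_cons_of_pos hc, ih, h0, valM]
      have e : '0'.toNat = 48 := by decide
      rw [e]
      simp
    · rw [List.dropWhile_cons_of_neg (by simpa using hc)]

theorem dropWhile_head_not {p : Char → Bool} {cs : List Char} {x : Char} {t : List Char}
    (h : cs.dropWhile p = x :: t) : p x = false := by
  have := List.head?_dropWhile_not p cs
  rw [h] at this
  simpa using this

theorem valM_lt {ds : List Char} (h : ∀ c ∈ ds, 48 ≤ c.toNat ∧ c.toNat ≤ 57) :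
    valM ds < 10 ^ ds.length := by
  induction ds with
  | nil => simp [valM]
  | cons c cs ih =>
    have hc := h c List.mem_cons_self
    have htail := ih (fun d hd => h d (List.mem_cons_of_mem _ hd))
    rw [valM]
    have h9 : c.toNat - 48 ≤ 9 := by omega
    have := Nat.mul_le_mul_right (10 ^ cs.length) h9
    simp only [List.length_cons, pow_succ]
    omega

theorem valM_ge {c : Char} {t : List Char} (h49 : 49 ≤ c.toNat) :
    10 ^ t.length ≤ valM (c :: t) := by
  rw [valM]
  have h1 : 1 ≤ c.toNat - 48 := by omega
  have := Nat.mul_le_mul_right (10 ^ t.length) h1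
  omega

-- a :: as < b :: bs in the lexicographic order (Mathlib's LinearOrder on List Char)
theorem cons_lt_iff (a b : Char) (as bs : List Char) :
    (a :: as < b :: bs) ↔ (a < b ∨ (a = b ∧ as < bs)) := by
  show List.Lex _ _ _ ↔ _
  constructor
  · intro h
    cases h with
    | rel h => exact Or.inl h
    | cons h => exact Or.inr ⟨rfl, h⟩
  · rintro (h | ⟨rfl, h⟩)
    · exact List.Lex.rel h
    · exact List.Lex.cons h

theorem cons_le_iff (a b : Char) (as bs : List Char) :
    (a :: as ≤ b :: bs) ↔ (a < b ∨ (a = b ∧ as ≤ bs)) := by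
  rw [le_iff_lt_or_eq, cons_lt_iff, le_iff_lt_or_eq (a := as), List.cons.injEq]
  tauto

theorem lex_iff : ∀ (ds es : List Char), ds.length = es.length →
    (∀ c ∈ ds, 48 ≤ c.toNat ∧ c.toNat ≤ 57) → (∀ c ∈ es, 48 ≤ c.toNat ∧ c.toNat ≤ 57) →
    (ds ≤ es ↔ valM ds ≤ valM es) := by
  intro ds
  induction ds with
  | nil =>
    intro es hlen _ _
    have : es = [] := by cases es <;> simp_all
    subst this; simp
  | cons a as ih =>
    intro es hlen hd he
    cases es with
    | nil => simp at hlen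
    | cons b bs =>
      have hlen' : as.length = bs.length := by simpa using hlen
      have ha := hd a List.mem_cons_self
      have hb := he b List.mem_cons_self
      have has : ∀ c ∈ as, 48 ≤ c.toNat ∧ c.toNat ≤ 57 := fun c hc => hd c (List.mem_cons_of_mem _ hc)
      have hbs : ∀ c ∈ bs, 48 ≤ c.toNat ∧ c.toNat ≤ 57 := fun c hc => he c (List.mem_cons_of_mem _ hc)
      have hva := valM_lt has
      have hvb := valM_lt hbs
      rw [cons_le_iff, valM, valM, hlen']
      rw [hlen'] at hva
      have hlt : a < b ↔ a.toNat < b.toNat := by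
        rw [Char.lt_def, UInt32.lt_iff_toNat_lt]; rfl
      have heqc : a = b ↔ a.toNat = b.toNat := by
        constructor
        · rintro rfl; rfl
        · intro h; exact char_of_toNat rfl b h.symm
      rw [hlt, heqc, ih bs hlen' has hbs]
      constructor
      · rintro (h | ⟨heq, hle⟩)
        · have h1 : a.toNat - 48 + 1 ≤ b.toNat - 48 := by omega
          have h2 := Nat.mul_le_mul_right (10 ^ bs.length) h1
          have h3 : (a.toNat - 48 + 1) * 10 ^ bs.length
              = (a.toNat - 48) * 10 ^ bs.length + 10 ^ bs.length := by ring
          omega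
        · rw [heq]; omega
      · intro h
        by_cases hab : a.toNat < b.toNat
        · exact Or.inl hab
        · right
          by_cases haeq : a.toNat = b.toNat
          · refine ⟨haeq, ?_⟩
            rw [haeq] at h; omega
          · exfalso
            have h1 : b.toNat - 48 + 1 ≤ a.toNat - 48 := by omega
            have h2 := Nat.mul_le_mul_right (10 ^ bs.length) h1
            have h3 : (b.toNat - 48 + 1) * 10 ^ bs.length
                = (b.toNat - 48) * 10 ^ bs.length + 10 ^ bs.length := by ring
            omega

-- ===== VERDICT (by name: the statement is the Claim_ definition above) =====
theorem is_port_py_spec : Claim_equal_is_port_py := by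
  unfold Claim_equal_is_port_py
  intro val _
  unfold Spec_is_port_py is_port_py is_port_py_alt
  cases hl : val.toList with
  | nil => simp [PySem.Str.len, hl, PySem.Chars.stripChars]
  | cons c cs =>
    have hlen : (PySem.Str.len val == 0) = false := by
      rw [PySem.Str.len_eq, hl]
      simp only [List.length_cons, beq_eq_false_iff_ne, ne_eq]
      omega
    rw [hlen]
    simp only [List.isEmpty_cons, Bool.false_or, Bool.false_eq_true, if_false]
    cases hs : aScan (c :: cs) with
    | false =>
      simp only [Bool.false_eq_true, if_false]
      have hstrip : PySem.Chars.stripChars (c :: cs) bDigits ≠ [] := by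
        intro h
        rw [(strip_empty_iff (c :: cs)).mp h] at hs
        exact Bool.noConfusion hs
      have : ((PySem.Chars.stripChars (c :: cs) bDigits).isEmpty) = false := by
        simpa [List.isEmpty_iff] using hstrip
      rw [this]
      rfl
    | true =>
      simp only [if_true]
      have hstrip : PySem.Chars.stripChars (c :: cs) bDigits = [] :=
        (strip_empty_iff (c :: cs)).mpr hs
      rw [hstrip]
      simp only [List.isEmpty_nil, Bool.not_true, Bool.false_eq_true, if_false]
      rw [lem_clone (by simp) hs]
      have hA : (decide ((pvFold (c :: cs) 0 : Nat) ≤ (65535 : Int)) : Bool)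
          = decide (valM (c :: cs) ≤ 65535) := by
        rw [pvFold_eq_valM]
        simp only [Nat.zero_mul, Nat.zero_add]
        simp
      have hred : (match some ((pvFold (c :: cs) 0 : Nat) : Int) with
          | some n => decide (n ≤ 65535) | none => false)
          = decide (((pvFold (c :: cs) 0 : Nat) : Int) ≤ 65535) := rfl
      rw [hred, hA]
      set s := (c :: cs).dropWhile (fun c => (['0'] : List Char).contains c) with hsdef
      have hvs : valM s = valM (c :: cs) := valM_dropZeros (c :: cs)
      have hsdig : ∀ x ∈ s, 48 ≤ x.toNat ∧ x.toNat ≤ 57 := by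
        intro x hx
        exact lem_scan_mem hs ((List.dropWhile_sublist _).mem hx)
      rw [← hvs]
      rcases Nat.lt_or_ge s.length 5 with h5 | h5
      · -- len(s) < 5: value < 10^4 ≤ 65535
        have hv := valM_lt hsdig
        have : valM s < 100000 := by
          calc valM s < 10 ^ s.length := hv
            _ ≤ 10 ^ 4 := Nat.pow_le_pow_right (by norm_num) (by omega)
            _ ≤ 100000 := by norm_num
        have hv' : valM s ≤ 65535 := by
          have : valM s < 10 ^ 4 := lt_of_lt_of_le hv (Nat.pow_le_pow_right (by norm_num) (by omega))
          omega
        simp [h5, hv']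
      · rcases Nat.eq_or_lt_of_le h5 with h5e | h5gt
        · -- len(s) = 5: lexicographic vs numeric
          have hdig65 : ∀ x ∈ b65535, 48 ≤ x.toNat ∧ x.toNat ≤ 57 := by
            intro x hx
            rcases (by simpa [b65535] using hx : x = '6' ∨ x = '5' ∨ x = '5' ∨ x = '3' ∨ x = '5')
              with rfl | rfl | rfl | rfl | rfl <;> exact ⟨by decide, by decide⟩
          have hlex := lex_iff s b65535 (by rw [← h5e]; rfl) hsdig hdig65
          have hval : valM b65535 = 65535 := by decide
          rw [hval] at hlex
          have : (decide (s ≤ b65535) : Bool) = decide (valM s ≤ 65535) := by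
            simp [hlex]
          simp only [← h5e, lt_irrefl]
          simp [this]
        · -- len(s) ≥ 6: value ≥ 10^5 > 65535
          obtain ⟨d, t, hdt⟩ : ∃ d t, s = d :: t := by
            cases hse : s with
            | nil => rw [hse] at h5gt; simp at h5gt
            | cons d t => exact ⟨d, t, rfl⟩
          have hdnot : ((['0'] : List Char).contains d) = false :=
            dropWhile_head_not (hsdef.symm.trans hdt)
          have hd0 : d ≠ '0' := by
            intro h
            rw [h] at hdnot
            have ht : (['0'] : List Char).contains '0' = true := by decide
            exact Bool.noConfusion (ht.symm.trans hdnot)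
          have hd49 : 49 ≤ d.toNat := by
            have hmemd : d ∈ s := by rw [hdt]; exact List.mem_cons_self
            have hdd := hsdig d hmemd
            have hne : d.toNat ≠ 48 := fun hh => hd0 (char_of_toNat hh '0' (by decide))
            omega
          have hge : 10 ^ t.length ≤ valM s := by rw [hdt]; exact valM_ge hd49
          have htlen : 5 ≤ t.length := by
            rw [hdt] at h5gt; simp at h5gt; omega
          have hbig : 65535 < valM s := by
            calc (65535 : Nat) < 10 ^ 5 := by norm_num
              _ ≤ 10 ^ t.length := Nat.pow_le_pow_right (by norm_num) htlen
              _ ≤ valM s := hge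
          have hlf : (s.length < 5) = False := by simp; omega
          have hle : (s.length = 5) = False := by simp; omega
          simp [hlf, hle, Nat.not_le.mpr hbig]
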